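-- pv_equiv track=rewrite | github.com/LucasConde22/TPs-TDA | Guías/PD/v2/14.py | lunatico
-- ===== SOURCE A (Python) =====
-- def lunatico(ganancias):
--     if len(ganancias) == 0:
--         return []
--     if len(ganancias) == 1:
--         return [0]
--
--     ganancia0 = [0] * (len(ganancias) - 1)
--     ganancia1 = [0] * (len(ganancias) - 1)
--
--     ganancia0[0] = ganancias[0]
--     ganancia1[0] = ganancias[1]
--
--     for i in range(1, len(ganancias) - 1):
--         if i == 1:
--             ganancia0[i] = max(ganancia0[i - 1], ganancias[i])
--             ganancia1[i] = max(ganancia1[i - 1], ganancias[i + 1])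
--         else:
--             ganancia0[i] = max(ganancia0[i - 1], ganancia0[i - 2] + ganancias[i])
--             ganancia1[i] = max(ganancia1[i - 1], ganancia1[i - 2] + ganancias[i + 1])
--
--     if ganancia0[-1] >= ganancia1[-1]:
--         ganancia = ganancia0
--         offset = 0
--     else:
--         ganancia = ganancia1
--         offset = 1
--
--     camino = []
--     i = len(ganancia0) - 1
--     while i >= 0:
--         if i == 0 or ganancia[i] != ganancia[i - 1]:
--             camino.append(i + offset)
--             i -= 2
--         else:
--             i -= 1
--
--     return camino[::-1]
-- ===== SOURCE B (Python) =====
-- def rob_with_path(arr):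
--     # forward DP that materialises the optimal index set as it goes:
--     # a persistent (shared) linked list per DP state, no backtracking pass.
--     v2, p2 = 0, None           # best total / path excluding the previous element
--     v1, p1 = arr[0], (None, 0) # best total / path over the prefix seen so far
--     for i in range(1, len(arr)):
--         c = v2 + arr[i]
--         if c > v1:
--             v1, v2, p1, p2 = c, v1, (p2, i), p1
--         else:
--             v2, p2 = v1, p1
--     out = []
--     node = p1
--     while node is not None:
--         out.append(node[1])
--         node = node[0]
--     out.reverse()
--     return v1, out
--
--
-- def lunatico(ganancias):
--     if not ganancias:
--         return []
--     if len(ganancias) == 1: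
--         return [0]
--     t0, s0 = rob_with_path(ganancias[:-1])
--     t1, s1 = rob_with_path(ganancias[1:])
--     if t0 >= t1:
--         return s0
--     return [i + 1 for i in s1]
-- ===== Notes on version B (the rewrite author's own statement) =====
-- stated objective: faster
-- what changed: A fills two full DP tables and then recovers the index set by a separate backward while-loop over the stored table (take i iff the value changed, step -2/-1) plus a final reverse; B has no stored table and no backtracking pass at all: a helper rob_with_path does one forward scan carrying the optimal index set itself as shared persistent linked lists (two (value, path) states), called on ganancias[:-1] and ganancias[1:], with the second answer shifted by +1 when its total wins strictly. (measured ~1.9-2.3x: one pass instead of table-fill + backtrack, and no per-step table writes)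
import Mathlib
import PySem

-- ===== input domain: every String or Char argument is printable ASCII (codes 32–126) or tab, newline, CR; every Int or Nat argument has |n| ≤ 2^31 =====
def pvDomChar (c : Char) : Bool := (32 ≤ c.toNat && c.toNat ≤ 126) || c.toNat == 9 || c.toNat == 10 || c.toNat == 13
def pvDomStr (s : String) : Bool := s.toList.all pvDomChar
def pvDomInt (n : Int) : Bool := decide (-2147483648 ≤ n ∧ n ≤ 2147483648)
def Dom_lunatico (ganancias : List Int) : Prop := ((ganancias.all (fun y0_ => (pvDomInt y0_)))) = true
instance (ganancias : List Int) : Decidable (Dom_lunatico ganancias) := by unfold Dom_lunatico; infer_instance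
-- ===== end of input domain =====

-- B replaces A's table-plus-backtracking scheme by a single forward DP that carries the
-- optimal index set itself (shared persistent linked lists), so no reconstruction walk
-- over a stored table exists in B; objective: a different decomposition, measured faster in a timing run (constant factor).

-- ===== PORT A =====
-- ganancia[i] with 0 ≤ i < len (in range wherever A reaches it); default never used
def pvGetI (l : List Int) (i : Int) : Int := PySem.List.pyGetD l i 0

-- the body of A's for-loop over range(1, len-1)
def aStep (ganancias : List Int) (p : List Int × List Int) (i : Int) : List Int × List Int :=
  if i = 1 then
    (PySem.List.pySetD p.1 i (max (pvGetI p.1 (i-1)) (pvGetI ganancias i)),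
     PySem.List.pySetD p.2 i (max (pvGetI p.2 (i-1)) (pvGetI ganancias (i+1))))
  else
    (PySem.List.pySetD p.1 i (max (pvGetI p.1 (i-1)) (pvGetI p.1 (i-2) + pvGetI ganancias i)),
     PySem.List.pySetD p.2 i (max (pvGetI p.2 (i-1)) (pvGetI p.2 (i-2) + pvGetI ganancias (i+1))))

-- A's while-loop: i descends by 1 or 2, appending i+offset to camino
def walkA (g : List Int) (offset : Int) (i : Int) (camino : List Int) : List Int :=
  if _h : 0 ≤ i then
    if i = 0 ∨ pvGetI g i ≠ pvGetI g (i-1) then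
      walkA g offset (i-2) (camino ++ [i + offset])
    else
      walkA g offset (i-1) camino
  else camino
termination_by (i+2).toNat
decreasing_by all_goals omega

def lunatico (ganancias : List Int) : List Int :=
  if ganancias.length = 0 then []
  else if ganancias.length = 1 then [0]
  else
    let n := ganancias.length
    let g0 := PySem.List.pySetD (List.replicate (n-1) (0:Int)) 0 (pvGetI ganancias 0)
    let g1 := PySem.List.pySetD (List.replicate (n-1) (0:Int)) 0 (pvGetI ganancias 1)
    let p := (PySem.List.pyRange 1 ((n:Int)-1) 1).foldl (aStep ganancias) (g0, g1)
    let q := if pvGetI p.1 (-1) ≥ pvGetI p.2 (-1) then (p.1, (0:Int)) else (p.2, (1:Int))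
    (walkA q.1 q.2 ((p.1.length : Int) - 1) []).reverse  -- camino[::-1]

-- ===== PORT B =====
-- Source B's loop body; state (v2, p2, v1, p1): Source B's persistent linked lists are cons lists
-- here (newest index at the head), exact to Source B's tuple chains
def bStep (arr : List Int) (s : Int × List Int × Int × List Int) (i : Int) :
    Int × List Int × Int × List Int :=
  let c := s.1 + pvGetI arr i
  if c > s.2.2.1 then (s.2.2.1, s.2.2.2, c, i :: s.2.1)
  else (s.2.2.1, s.2.2.2, s.2.2.1, s.2.2.2)

-- Source B's rob_with_path: forward fold, then the unwind loop (= reverse of the cons chain)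
def robPath (arr : List Int) : Int × List Int :=
  let s := (PySem.List.pyRange 1 (arr.length : Int) 1).foldl (bStep arr)
             (0, [], pvGetI arr 0, [0])
  (s.2.2.1, s.2.2.2.reverse)

def lunatico_alt (ganancias : List Int) : List Int :=
  if ganancias.isEmpty then []
  else if ganancias.length = 1 then [0]
  else
    let r0 := robPath (PySem.List.slice ganancias none (some (-1)))  -- ganancias[:-1]
    let r1 := robPath (PySem.List.slice ganancias (some 1) none)     -- ganancias[1:]
    if r0.1 ≥ r1.1 then r0.2 else r1.2.map (fun i => i + 1)

-- ===== PRECONDITION & SPEC =====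
def Spec_lunatico (ganancias : List Int) (out : List Int) : Prop := out = lunatico_alt ganancias
instance (ganancias : List Int) (out : List Int) : Decidable (Spec_lunatico ganancias out) := by unfold Spec_lunatico; infer_instance

-- ===== CLAIM (what is proved, stated in full; the proofs are below) =====
def Claim_equal_lunatico : Prop := ∀ (ganancias : List Int), Dom_lunatico ganancias → Spec_lunatico ganancias (lunatico ganancias)

-- ===== LEMMAS AND PROOFS =====

-- the linear DP values, as a recurrence (Gt arr k = A's ganancia-table entry k)
def Gt (arr : List Int) : Nat → Int
  | 0 => pvGetI arr 0
  | 1 => max (pvGetI arr 0) (pvGetI arr 1)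
  | (k+2) => max (Gt arr (k+1)) (Gt arr k + pvGetI arr ((k:Int)+2))

-- A's backward walk run against a concrete table, descending order, as plain recursion
def recT (g : List Int) (i : Int) : List Int :=
  if _h : 0 ≤ i then
    if i = 0 ∨ pvGetI g i ≠ pvGetI g (i-1) then i :: recT g (i-2) else recT g (i-1)
  else []
termination_by (i+2).toNat
decreasing_by all_goals omega

-- the same walk against the Gt recurrence instead of a stored table
def recG (arr : List Int) (i : Int) : List Int :=
  if _h : 0 ≤ i then
    if i = 0 ∨ Gt arr i.toNat ≠ Gt arr (i.toNat - 1) then i :: recG arr (i-2) else recG arr (i-1)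
  else []
termination_by (i+2).toNat
decreasing_by all_goals omega

-- the pair of cons-paths B's fold carries after j loop steps: (p1, p2)
def pathG (arr : List Int) : Nat → List Int × List Int
  | 0 => ([0], [])
  | (k+1) =>
      let s := pathG arr k
      if Gt arr (k+1) ≠ Gt arr k then (((k+1 : Nat) : Int) :: s.2, s.1) else (s.1, s.1)

lemma pvGetI_eq_getElem (l : List Int) (k : Nat) (hk : k < l.length) :
    pvGetI l (k : Int) = l[k] := by
  simp [pvGetI, List.getD, hk]

lemma pvGetI_tail (l : List Int) (k : Nat) :
    pvGetI l.tail (k : Int) = pvGetI l ((k : Int) + 1) := by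
  have h : ((k : Int) + 1) = ((k + 1 : Nat) : Int) := by push_cast; ring
  simp only [pvGetI, h, PySem.List.pyGetD_natCast]
  simp [List.getD, List.getElem?_tail]

lemma pvGetI_dropLast (l : List Int) (k : Nat) (hk : k < l.length - 1) :
    pvGetI l.dropLast (k : Int) = pvGetI l (k : Int) := by
  have h1 : k < l.dropLast.length := by simp [List.length_dropLast]; omega
  have h2 : k < l.length := by omega
  rw [pvGetI_eq_getElem _ _ h1, pvGetI_eq_getElem _ _ h2, List.getElem_dropLast]

lemma pvGetI_set_self (l : List Int) (a : Nat) (v : Int) (ha : a < l.length) :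
    pvGetI (l.set a v) (a : Int) = v := by
  simp [pvGetI, List.getD, ha]

lemma pvGetI_set_ne (l : List Int) (a k : Nat) (v : Int) (hne : k ≠ a) :
    pvGetI (l.set a v) (k : Int) = pvGetI l (k : Int) := by
  have hne' : a ≠ k := Ne.symm hne
  simp [pvGetI, List.getD, hne']

-- A's while-loop equals the plain recursion over its table, shifted by the offset
lemma walkA_eq_recT (g : List Int) (off : Int) :
    ∀ (i : Int) (camino : List Int),
      walkA g off i camino = camino ++ (recT g i).map (fun x => x + off) := by
  suffices H : ∀ (m : Nat) (i : Int), (i+2).toNat ≤ m → ∀ camino,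
      walkA g off i camino = camino ++ (recT g i).map (fun x => x + off) by
    intro i camino; exact H ((i+2).toNat) i le_rfl camino
  intro m
  induction m with
  | zero =>
    intro i hm camino
    have hneg : ¬ (0 ≤ i) := by omega
    rw [walkA, recT]
    simp [hneg]
  | succ m ih =>
    intro i hm camino
    rw [walkA, recT]
    by_cases h0 : 0 ≤ i
    · simp only [dif_pos h0]
      by_cases hc : i = 0 ∨ pvGetI g i ≠ pvGetI g (i-1)
      · rw [if_pos hc, if_pos hc, ih (i-2) (by omega)]
        simp
      · rw [if_neg hc, if_neg hc, ih (i-1) (by omega)]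
    · simp [h0]

-- the table walk equals the Gt walk once the table's entries up to j are the Gt values
lemma recT_eq_recG (tbl arr : List Int) (j : Nat)
    (hent : ∀ k : Nat, k ≤ j → pvGetI tbl (k : Int) = Gt arr k) :
    ∀ (i : Int), i ≤ (j : Int) → recT tbl i = recG arr i := by
  suffices H : ∀ (m : Nat) (i : Int), (i+2).toNat ≤ m → i ≤ (j : Int) →
      recT tbl i = recG arr i by
    intro i hi; exact H ((i+2).toNat) i le_rfl hi
  intro m
  induction m with
  | zero =>
    intro i hm _
    have hneg : ¬ (0 ≤ i) := by omega
    rw [recT, recG]; simp [hneg]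
  | succ m ih =>
    intro i hm hij
    rw [recT, recG]
    by_cases h0 : 0 ≤ i
    · simp only [dif_pos h0]
      have hcond : (i = 0 ∨ pvGetI tbl i ≠ pvGetI tbl (i-1))
          ↔ (i = 0 ∨ Gt arr i.toNat ≠ Gt arr (i.toNat - 1)) := by
        by_cases hi0 : i = 0
        · simp [hi0]
        · have h1 : 1 ≤ i := by omega
          have e1 : i = ((i.toNat : Nat) : Int) := by omega
          have e2 : i - 1 = ((i.toNat - 1 : Nat) : Int) := by omega
          have ha := hent i.toNat (by omega)
          have hb := hent (i.toNat - 1) (by omega)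
          rw [← e1] at ha
          rw [← e2] at hb
          rw [ha, hb]
      by_cases hc : i = 0 ∨ Gt arr i.toNat ≠ Gt arr (i.toNat - 1)
      · rw [if_pos (hcond.mpr hc), if_pos hc, ih (i-2) (by omega) (by omega)]
      · rw [if_neg (fun h => hc (hcond.mp h)), if_neg hc, ih (i-1) (by omega) (by omega)]
    · simp [h0]

-- the Gt walk is exactly B's first carried path (and at i-1, the second)
lemma recG_eq_pathG (arr : List Int) :
    ∀ j : Nat, recG arr ((j : Int)) = (pathG arr j).1
      ∧ recG arr ((j : Int) - 1) = (pathG arr j).2 := by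
  intro j
  induction j with
  | zero =>
    constructor
    · rw [recG]
      norm_num
      rw [recG]
      norm_num
      simp [pathG]
    · rw [recG]
      norm_num
      simp [pathG]
  | succ j ih =>
    have e0 : ¬(((j + 1 : Nat) : Int) = 0) := by push_cast; omega
    have e1 : ((j + 1 : Nat) : Int).toNat = j + 1 := by omega
    have e2 : ((j + 1 : Nat) : Int) - 2 = (j : Int) - 1 := by push_cast; ring
    have e3 : ((j + 1 : Nat) : Int) - 1 = (j : Int) := by push_cast; ring
    constructor
    · rw [recG, dif_pos (by positivity), e1, Nat.add_sub_cancel, e2, e3]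
      by_cases hc : Gt arr (j + 1) ≠ Gt arr j
      · rw [if_pos (Or.inr hc), ih.2]
        simp only [pathG, if_pos hc]
      · rw [if_neg (by tauto), ih.1]
        simp only [pathG]
        rw [if_neg hc]
    · rw [e3, ih.1]
      simp only [pathG]
      by_cases hc : Gt arr (j + 1) ≠ Gt arr j
      · rw [if_pos hc]
      · rw [if_neg hc]

-- uniform successor step of the DP recurrence (the j = 0 case has previous value 0)
lemma Gt_succ (arr : List Int) (j : Nat) :
    Gt arr (j+1)
      = max (Gt arr j) ((if j = 0 then 0 else Gt arr (j-1)) + pvGetI arr ((j:Int)+1)) := by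
  cases j with
  | zero => simp [Gt]
  | succ k =>
    rw [show Gt arr (k+2) = max (Gt arr (k+1)) (Gt arr k + pvGetI arr ((k:Int)+2)) from rfl]
    simp only [if_neg (Nat.succ_ne_zero k), Nat.add_sub_cancel]
    congr 2

-- B's fold after j steps, in closed form
lemma foldB (arr : List Int) (j : Nat) (hj : j + 1 ≤ arr.length) :
    (PySem.List.pyRange 1 ((j : Int) + 1) 1).foldl (bStep arr) (0, [], pvGetI arr 0, [0])
      = ((if j = 0 then 0 else Gt arr (j-1)), (pathG arr j).2, Gt arr j, (pathG arr j).1) := by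
  induction j with
  | zero =>
    rw [show ((0:Nat):Int)+1 = 1 by norm_num, PySem.List.pyRange_one_eq_nil (by omega)]
    simp [Gt, pathG]
  | succ j ih =>
    have hrange : PySem.List.pyRange 1 (((j+1:Nat):Int)+1) 1
        = PySem.List.pyRange 1 ((j:Int)+1) 1 ++ [((j+1:Nat):Int)] := by
      have h := PySem.List.pyRange_one_succ_right (a := 1) (b := (j:Int)+1) (by omega)
      rw [show (((j+1:Nat):Int)+1) = ((j:Int)+1)+1 by push_cast; ring, h]
      norm_num
    rw [hrange, List.foldl_append, ih (by omega), List.foldl_cons, List.foldl_nil]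
    have hidx : ((j+1:Nat):Int) = (j:Int)+1 := by push_cast; ring
    simp only [bStep, hidx]
    have hGs := Gt_succ arr j
    by_cases hc : (if j = 0 then 0 else Gt arr (j-1)) + pvGetI arr ((j:Int)+1) > Gt arr j
    · have hv : Gt arr (j+1)
          = (if j = 0 then 0 else Gt arr (j-1)) + pvGetI arr ((j:Int)+1) := by
        rw [hGs]
        exact max_eq_right (le_of_lt hc)
      have hne : Gt arr (j+1) ≠ Gt arr j := by rw [hv]; omega
      rw [if_pos hc]
      simp only [pathG, if_pos hne, Prod.mk.injEq, hidx]
      exact ⟨by simp, trivial, hv.symm, trivial⟩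
    · have hv : Gt arr (j+1) = Gt arr j := by
        rw [hGs]
        exact max_eq_left (by omega)
      have hne : ¬ (Gt arr (j+1) ≠ Gt arr j) := by omega
      rw [if_neg hc]
      simp only [pathG, if_neg hne, Prod.mk.injEq]
      exact ⟨by simp, trivial, hv.symm, trivial⟩

-- ===== the A-side table fold (identical to A's loop), entrywise =====
def aFold (g : List Int) (b : Int) : List Int × List Int :=
  (PySem.List.pyRange 1 b 1).foldl (aStep g)
    (PySem.List.pySetD (List.replicate (g.length-1) (0:Int)) 0 (pvGetI g 0),
     PySem.List.pySetD (List.replicate (g.length-1) (0:Int)) 0 (pvGetI g 1))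

lemma pySetD_zero (l : List Int) (v : Int) : PySem.List.pySetD l 0 v = l.set 0 v := by
  rw [PySem.List.pySetD_of_nonneg l v (by norm_num)]
  norm_num

lemma pvGetI_zero_set (m : Nat) (hm : 0 < m) (v : Int) :
    pvGetI ((List.replicate m (0:Int)).set 0 v) 0 = v := by
  have := pvGetI_set_self (List.replicate m (0:Int)) 0 v (by simp [hm])
  simpa using this

lemma Gt0_dropLast (g : List Int) (hn : 2 ≤ g.length) : Gt g.dropLast 0 = pvGetI g 0 := by
  have := pvGetI_dropLast g 0 (by omega)
  simpa [Gt] using this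

lemma Gt0_tail (g : List Int) : Gt g.tail 0 = pvGetI g 1 := by
  have := pvGetI_tail g 0
  simpa [Gt] using this

lemma Gt1_dropLast (g : List Int) (hn : 3 ≤ g.length) :
    Gt g.dropLast 1 = max (Gt g.dropLast 0) (pvGetI g 1) := by
  have h1 := pvGetI_dropLast g 1 (by omega)
  simp only [Gt]
  norm_num at h1 ⊢
  rw [h1]

lemma Gt1_tail (g : List Int) :
    Gt g.tail 1 = max (Gt g.tail 0) (pvGetI g 2) := by
  have h1 := pvGetI_tail g 1
  simp only [Gt]
  norm_num at h1 ⊢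
  rw [h1]

lemma foldA (g : List Int) (hn : 2 ≤ g.length) (j : Nat) (hj : j ≤ g.length - 2) :
    (aFold g ((j:Int)+1)).1.length = g.length - 1 ∧
    (aFold g ((j:Int)+1)).2.length = g.length - 1 ∧
    ∀ k : Nat, k ≤ j →
      pvGetI (aFold g ((j:Int)+1)).1 (k:Int) = Gt g.dropLast k ∧
      pvGetI (aFold g ((j:Int)+1)).2 (k:Int) = Gt g.tail k := by
  induction j with
  | zero =>
    rw [aFold]
    rw [show ((0:Nat):Int)+1 = 1 by norm_num, PySem.List.pyRange_one_eq_nil (by omega)]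
    simp only [List.foldl_nil, pySetD_zero]
    refine ⟨by simp, by simp, ?_⟩
    intro k hk
    interval_cases k
    refine ⟨?_, ?_⟩
    · rw [Gt0_dropLast g hn]
      simpa using pvGetI_zero_set (g.length - 1) (by omega) (pvGetI g 0)
    · rw [Gt0_tail g]
      simpa using pvGetI_zero_set (g.length - 1) (by omega) (pvGetI g 1)
  | succ j ih =>
    have hj' : j ≤ g.length - 2 := by omega
    obtain ⟨hl1, hl2, hent⟩ := ih hj'
    have hrange : PySem.List.pyRange 1 (((j+1:Nat):Int)+1) 1
        = PySem.List.pyRange 1 ((j:Int)+1) 1 ++ [((j+1:Nat):Int)] := by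
      have h := PySem.List.pyRange_one_succ_right (a := 1) (b := (j:Int)+1) (by omega)
      rw [show (((j+1:Nat):Int)+1) = ((j:Int)+1)+1 by push_cast; ring, h]
      norm_num
    have hstep : aFold g (((j+1:Nat):Int)+1)
        = aStep g (aFold g ((j:Int)+1)) ((j+1:Nat):Int) := by
      rw [aFold, hrange, List.foldl_append, List.foldl_cons, List.foldl_nil, aFold]
    set p := aFold g ((j:Int)+1) with hp
    have hv1 : pvGetI p.1 ((j:Int)) = Gt g.dropLast j := (hent j le_rfl).1
    have hv2 : pvGetI p.2 ((j:Int)) = Gt g.tail j := (hent j le_rfl).2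
    have hnew : (aStep g p ((j+1:Nat):Int)).1
          = p.1.set (j+1) (Gt g.dropLast (j+1))
        ∧ (aStep g p ((j+1:Nat):Int)).2
          = p.2.set (j+1) (Gt g.tail (j+1)) := by
      cases j with
      | zero =>
        rw [aStep, if_pos (by norm_num)]
        refine ⟨?_, ?_⟩
        · simp only [PySem.List.pySetD_natCast]
          congr 1
          norm_num at hv1 ⊢
          rw [Gt1_dropLast g (by omega), hv1]
        · simp only [PySem.List.pySetD_natCast]
          congr 1
          norm_num at hv2 ⊢
          rw [Gt1_tail g, hv2]
      | succ k =>
        rw [aStep, if_neg (by push_cast; omega)]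
        have e1 : (((k+1+1:Nat):Int) - 1) = ((k+1:Nat):Int) := by push_cast; ring
        have e2 : (((k+1+1:Nat):Int) - 2) = ((k:Nat):Int) := by push_cast; ring
        have e3 : ((k+1+1:Nat):Int) = (k:Int) + 2 := by push_cast; ring
        have hw1 : pvGetI p.1 ((k:Int)) = Gt g.dropLast k := (hent k (by omega)).1
        have hw2 : pvGetI p.2 ((k:Int)) = Gt g.tail k := (hent k (by omega)).2
        constructor
        · simp only [PySem.List.pySetD_natCast]
          congr 1
          rw [e1, e2, hv1, hw1]
          rw [show (Gt g.dropLast (k+2))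
              = max (Gt g.dropLast (k+1)) (Gt g.dropLast k + pvGetI g.dropLast ((k:Int)+2)) from rfl]
          rw [show ((k:Int)+2) = ((k+2:Nat):Int) by push_cast; ring,
            pvGetI_dropLast g (k+2) (by omega), e3]
        · simp only [PySem.List.pySetD_natCast]
          congr 1
          rw [e1, e2, hv2, hw2]
          rw [show (Gt g.tail (k+2))
              = max (Gt g.tail (k+1)) (Gt g.tail k + pvGetI g.tail ((k:Int)+2)) from rfl]
          rw [show ((k:Int)+2) = ((k+2:Nat):Int) by push_cast; ring, pvGetI_tail, e3]
    have hL1 : (aStep g p ((j+1:Nat):Int)).1.length = g.length - 1 := by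
      rw [hnew.1, List.length_set, hl1]
    have hL2 : (aStep g p ((j+1:Nat):Int)).2.length = g.length - 1 := by
      rw [hnew.2, List.length_set, hl2]
    refine ⟨by rw [hstep]; exact hL1, by rw [hstep]; exact hL2, ?_⟩
    intro k hk
    rw [hstep, hnew.1, hnew.2]
    by_cases hkj : k = j + 1
    · subst hkj
      exact ⟨pvGetI_set_self _ _ _ (by omega), pvGetI_set_self _ _ _ (by omega)⟩
    · have hk' : k ≤ j := by omega
      rw [pvGetI_set_ne _ _ _ _ (by omega), pvGetI_set_ne _ _ _ _ (by omega)]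
      exact hent k hk'

lemma pvGetI_neg_one (l : List Int) (h : l ≠ []) :
    pvGetI l (-1) = pvGetI l ((l.length - 1 : Nat) : Int) := by
  have hlen : 0 < l.length := List.length_pos_iff.mpr h
  rw [pvGetI, show PySem.List.pyGetD l (-1) 0 = (PySem.List.pyGet? l (-1)).getD 0 from rfl,
    PySem.List.pyGet?_neg_one, List.getLast?_eq_getElem?,
    pvGetI_eq_getElem _ _ (by omega), List.getElem?_eq_getElem (by omega)]
  rfl

-- ===== VERDICT (by name: the statement is the Claim_ definition above) =====
theorem lunatico_spec : Claim_equal_lunatico := by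
  unfold Claim_equal_lunatico
  intro g _
  unfold Spec_lunatico
  by_cases h0 : g.length = 0
  · have : g = [] := List.length_eq_zero_iff.mp h0
    subst this
    simp [lunatico, lunatico_alt]
  by_cases h1 : g.length = 1
  · obtain ⟨x, hx⟩ := List.length_eq_one_iff.mp h1
    subst hx
    simp [lunatico, lunatico_alt]
  have hn : 2 ≤ g.length := by omega
  have hb : ((g.length : Int) - 1) = ((g.length - 2 : Nat) : Int) + 1 := by omega
  obtain ⟨hl1, hl2, hent⟩ := foldA g hn (g.length - 2) le_rfl
  set j := g.length - 2 with hjdef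
  set p := aFold g ((j:Int)+1) with hpdef
  set arr0 := g.dropLast with ha0
  set arr1 := g.tail with ha1
  have hlen0 : arr0.length = g.length - 1 := by simp [ha0]
  have hlen1 : arr1.length = g.length - 1 := by simp [ha1]
  have hc1 : pvGetI p.1 (-1) = Gt arr0 j := by
    rw [pvGetI_neg_one _ (by intro h; rw [h] at hl1; simp at hl1; omega), hl1]
    exact (hent j (by omega)).1
  have hc2 : pvGetI p.2 (-1) = Gt arr1 j := by
    rw [pvGetI_neg_one _ (by intro h; rw [h] at hl2; simp at hl2; omega), hl2]
    exact (hent j (by omega)).2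
  -- B on each slice, via foldB and recG_eq_pathG
  have hs0 : robPath arr0 = (Gt arr0 j, (recG arr0 (j:Int)).reverse) := by
    rw [robPath, hlen0, show ((g.length - 1 : Nat) : Int) = ((j:Nat):Int) + 1 from by omega,
      foldB arr0 j (by omega), (recG_eq_pathG arr0 j).1]
  have hs1 : robPath arr1 = (Gt arr1 j, (recG arr1 (j:Int)).reverse) := by
    rw [robPath, hlen1, show ((g.length - 1 : Nat) : Int) = ((j:Nat):Int) + 1 from by omega,
      foldB arr1 j (by omega), (recG_eq_pathG arr1 j).1]
  -- A's walk equals the Gt walk on each table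
  have hr0 : recT p.1 ((j:Nat):Int) = recG arr0 ((j:Nat):Int) :=
    recT_eq_recG p.1 arr0 j (fun k hk => (hent k hk).1) _ le_rfl
  have hr1 : recT p.2 ((j:Nat):Int) = recG arr1 ((j:Nat):Int) :=
    recT_eq_recG p.2 arr1 j (fun k hk => (hent k hk).2) _ le_rfl
  rw [lunatico, if_neg h0, if_neg h1, lunatico_alt,
    if_neg (fun h => h0 (List.isEmpty_iff_length_eq_zero.mp h)), if_neg h1]
  have haf : List.foldl (aStep g)
      (PySem.List.pySetD (List.replicate (g.length-1) (0:Int)) 0 (pvGetI g 0),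
       PySem.List.pySetD (List.replicate (g.length-1) (0:Int)) 0 (pvGetI g 1))
      (PySem.List.pyRange 1 ((g.length:Int) - 1) 1) = p := by
    rw [hb, hpdef, aFold]
  simp only [PySem.List.slice_to_neg_one, PySem.List.slice_from_one, ← ha0, ← ha1,
    haf, hs0, hs1, hc1, hc2]
  have hplen : ((p.1.length : Int) - 1) = ((j:Nat):Int) := by rw [hl1]; omega
  by_cases hge : Gt arr0 j ≥ Gt arr1 j
  · simp only [if_pos hge]
    rw [walkA_eq_recT p.1 0 _ [], hplen, hr0]
    simp
  · simp only [if_neg hge]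
    rw [walkA_eq_recT p.2 1 _ [], hplen, hr1]
    simp
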